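-- pv_equiv track=rewrite | github.com/bhagirathauti/-6Companies30days | phonedirectory.py | displayContacts
-- ===== SOURCE A (Python) =====
-- def displayContacts(n, contact, s):
--     # code here
--     contact=sorted(set(contact))
--     res = []
--     for i in range(0,len(s)):
--         prefix = s[:i+1]
--         matches = [c for c in contact if c.startswith(prefix)]
--         if not matches:
--             res.append(["0"])
--         else:
--             res.append(matches)
--     return res
-- ===== SOURCE B (Python) =====
-- def displayContacts(n, contact, s):
--     # Incremental narrowing: keep only candidates still matching, checking one
--     # character per step; once empty, all remaining answers are ["0"].
--     cands = sorted(set(contact))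
--     res = []
--     for i, ch in enumerate(s):
--         cands = [c for c in cands if len(c) > i and c[i] == ch]
--         if not cands:
--             return res + [["0"]] * (len(s) - i)
--         res.append(cands)
--     return res
-- ===== Notes on version B (the rewrite author's own statement) =====
-- stated objective: faster
-- what changed: Instead of re-filtering the whole sorted contact list with startswith for every prefix, B narrows one surviving candidate list incrementally (one character comparison per candidate per step) and early-exits to ["0"]-padding once it is empty.
import Mathlib
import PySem

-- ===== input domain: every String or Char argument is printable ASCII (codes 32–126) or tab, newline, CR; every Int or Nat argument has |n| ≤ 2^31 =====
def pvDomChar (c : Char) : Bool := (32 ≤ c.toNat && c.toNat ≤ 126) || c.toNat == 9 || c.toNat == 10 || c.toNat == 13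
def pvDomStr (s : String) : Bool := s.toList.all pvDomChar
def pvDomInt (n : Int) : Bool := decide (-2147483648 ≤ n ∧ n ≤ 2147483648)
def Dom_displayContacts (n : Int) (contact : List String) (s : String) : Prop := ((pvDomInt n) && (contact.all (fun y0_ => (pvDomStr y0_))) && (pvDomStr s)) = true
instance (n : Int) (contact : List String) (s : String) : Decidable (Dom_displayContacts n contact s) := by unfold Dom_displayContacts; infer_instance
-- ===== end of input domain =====

-- B replaces A's per-prefix full rescans with one incrementally narrowed candidate list
-- (one character test per surviving candidate per step, early exit when empty): faster.

-- ===== PORT A =====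
def displayContacts (n : Int) (contact : List String) (s : String) : List (List String) :=
  let contact := PySem.List.sorted (PySem.Set.ofList contact) (fun x => x) false
  (PySem.List.pyRange 0 (PySem.Str.len s) 1).foldl
    (fun res i =>
      let prefix_ := PySem.Str.slice s none (some (i + 1))
      let matches_ := contact.filter (fun c => PySem.Str.startswith c prefix_)
      if matches_ = [] then res ++ [["0"]] else res ++ [matches_]) []

-- ===== PORT B =====
-- loop of Source B: cands narrowed by the i-th character; early return pads with ["0"]
def dcGo (cands : List String) (chars : List Char) (i : Nat) (m : Nat) : List (List String) :=
  match chars with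
  | [] => []
  | ch :: rest =>
    let cands' := cands.filter (fun c =>
      decide ((i : Int) < PySem.Str.len c) && (PySem.Str.pyGet? c (i : Int) == some ch))
    if cands' = [] then List.replicate (m - i) ["0"]
    else cands' :: dcGo cands' rest (i + 1) m

def displayContacts_alt (n : Int) (contact : List String) (s : String) : List (List String) :=
  let cands := PySem.List.sorted (PySem.Set.ofList contact) (fun x => x) false
  dcGo cands s.toList 0 s.toList.length

-- ===== PRECONDITION & SPEC =====
def Spec_displayContacts (n : Int) (contact : List String) (s : String) (out : List (List String)) : Prop := out = displayContacts_alt n contact s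
instance (n : Int) (contact : List String) (s : String) (out : List (List String)) : Decidable (Spec_displayContacts n contact s out) := by unfold Spec_displayContacts; infer_instance

-- ===== CLAIM (what is proved, stated in full; the proofs are below) =====
def Claim_equal_displayContacts : Prop := ∀ (n : Int) (contact : List String) (s : String), Dom_displayContacts n contact s → Spec_displayContacts n contact s (displayContacts n contact s)

-- ===== LEMMAS AND PROOFS =====

-- the matches_ list for a given prefix p (on the char-list side)
def pvF (L : List String) (p : List Char) : List String :=
  L.filter (fun c => PySem.Chars.startswith c.toList p)

theorem pvF_nil (L : List String) : pvF L [] = L := by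
  unfold pvF
  apply List.filter_eq_self.2
  intro c _
  exact (PySem.Chars.startswith_iff _ _).2 (List.nil_prefix)

theorem pv_prefix_snoc (p : List Char) (ch : Char) (l : List Char) :
    p ++ [ch] <+: l ↔ p <+: l ∧ p.length < l.length ∧ l[p.length]? = some ch := by
  constructor
  · rintro ⟨r, hr⟩
    rw [List.append_assoc] at hr
    subst hr
    refine ⟨⟨ch :: r, rfl⟩, by simp, ?_⟩
    rw [List.getElem?_append_right (le_refl _)]
    simp
  · rintro ⟨⟨r, hr⟩, hlen, hget⟩
    subst hr
    match r with
    | [] => simp at hlen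
    | c' :: r' =>
      rw [List.getElem?_append_right (le_refl _)] at hget
      simp at hget
      subst hget
      exact ⟨r', by simp⟩

theorem pvF_step (L : List String) (p : List Char) (ch : Char) :
    pvF L (p ++ [ch]) =
      (pvF L p).filter (fun c =>
        decide ((p.length : Int) < PySem.Str.len c) &&
          (PySem.Str.pyGet? c (p.length : Int) == some ch)) := by
  unfold pvF
  rw [List.filter_filter]
  apply List.filter_congr
  intro c _
  rw [Bool.eq_iff_iff]
  simp only [Bool.and_eq_true, decide_eq_true_eq, beq_iff_eq,
    PySem.Chars.startswith_iff, PySem.Str.len_eq, PySem.Str.pyGet?_natCast]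
  rw [pv_prefix_snoc]
  constructor
  · rintro ⟨h1, h2, h3⟩; exact ⟨⟨by exact_mod_cast h2, h3⟩, h1⟩
  · rintro ⟨⟨h2, h3⟩, h1⟩; exact ⟨h1, by exact_mod_cast h2, h3⟩

theorem pvF_append_nil (L : List String) (p q : List Char) (h : pvF L p = []) :
    pvF L (p ++ q) = [] := by
  unfold pvF at *
  rw [List.filter_eq_nil_iff] at *
  intro c hc hsw
  refine h c hc ?_
  rw [PySem.Chars.startswith_iff] at *
  exact ((List.prefix_append p q).trans hsw)

theorem pv_take_append (p rest : List α) (m : Nat) :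
    (p ++ rest).take (p.length + m) = p ++ rest.take m := by
  rw [List.take_append, List.take_of_length_le (by omega),
    show p.length + m - p.length = m from by omega]

theorem dcGo_eq (rest : List Char) : ∀ (p : List Char) (L : List String),
    dcGo (pvF L p) rest p.length (p.length + rest.length) =
      (List.range rest.length).map (fun k =>
        let m := pvF L ((p ++ rest).take (p.length + k + 1))
        if m = [] then ["0"] else m) := by
  induction rest with
  | nil => intro p L; simp [dcGo]
  | cons ch rest ih =>
    intro p L
    rw [dcGo]
    rw [← pvF_step L p ch]
    have hsplit : ∀ k : Nat, (p ++ ch :: rest).take (p.length + k + 1)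
        = (p ++ [ch]) ++ rest.take k := by
      intro k
      have : p ++ ch :: rest = (p ++ [ch]) ++ rest := by simp
      rw [this]
      have hlen : (p ++ [ch]).length = p.length + 1 := by simp
      have : p.length + k + 1 = (p ++ [ch]).length + k := by simp; omega
      rw [this, pv_take_append]
    by_cases hE : pvF L (p ++ [ch]) = []
    · rw [if_pos hE]
      have : ∀ k ∈ List.range (ch :: rest).length,
          (let m := pvF L ((p ++ ch :: rest).take (p.length + k + 1));
            if m = [] then ["0"] else m) = (["0"] : List String) := by
        intro k _
        have : pvF L ((p ++ ch :: rest).take (p.length + k + 1)) = [] := by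
          rw [hsplit k]
          exact pvF_append_nil L (p ++ [ch]) (rest.take k) hE
        simp [this]
      rw [List.map_congr_left this]
      have hc : p.length + (ch :: rest).length - p.length = (ch :: rest).length :=
        Nat.add_sub_cancel_left _ _
      rw [hc]
      simp [List.map_const']
    · rw [if_neg hE]
      have hrec := ih (p ++ [ch]) L
      have hlen : (p ++ [ch]).length = p.length + 1 := by simp
      rw [hlen] at hrec
      have harith : p.length + 1 + rest.length = p.length + (ch :: rest).length := by
        simp; omega
      rw [harith] at hrec
      rw [hrec]
      rw [show (ch :: rest).length = rest.length + 1 from by simp]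
      rw [List.range_succ_eq_map, List.map_cons, List.map_map]
      refine List.cons_eq_cons.mpr ⟨?_, ?_⟩
      · have h0 : (p ++ ch :: rest).take (p.length + 0 + 1) = p ++ [ch] := by
          rw [hsplit 0]; simp
        simp only [h0, if_neg hE]
      · apply List.map_congr_left
        intro k _
        simp only [Function.comp_apply, Nat.succ_eq_add_one]
        have h1 : (p ++ [ch] ++ rest).take (p.length + 1 + k + 1)
            = p ++ [ch] ++ rest.take (k + 1) := by
          rw [show p.length + 1 + k + 1 = (p ++ [ch]).length + (k + 1) from by simp; omega]
          exact pv_take_append _ _ _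
        have h2 := hsplit (k + 1)
        simp only [h1]
        rw [h2]

theorem displayContacts_eq_map (L : List String) (s : String) :
    (PySem.List.pyRange 0 (PySem.Str.len s) 1).foldl
      (fun res i =>
        let prefix_ := PySem.Str.slice s none (some (i + 1))
        let matches_ := L.filter (fun c => PySem.Str.startswith c prefix_)
        if matches_ = [] then res ++ [["0"]] else res ++ [matches_]) [] =
    (List.range s.toList.length).map (fun k =>
      let m := pvF L (s.toList.take (k + 1))
      if m = [] then ["0"] else m) := by
  rw [PySem.Str.len_eq, PySem.List.pyRange_zero_natCast]
  rw [List.foldl_map]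
  have hstep : ∀ (res : List (List String)) (k : Nat),
      ((fun res (i : Int) =>
        let prefix_ := PySem.Str.slice s none (some (i + 1))
        let matches_ := L.filter (fun c => PySem.Str.startswith c prefix_)
        if matches_ = [] then res ++ [["0"]] else res ++ [matches_]) res (k : Int)) =
      res ++ [(let m := pvF L (s.toList.take (k + 1)); if m = [] then ["0"] else m)] := by
    intro res k
    have hpref : (PySem.Str.slice s none (some ((k : Int) + 1))).toList
        = s.toList.take (k + 1) := by
      rw [PySem.Str.toList_slice, PySem.Chars.slice_eq_listSlice]
      rw [show ((k : Int) + 1) = ((k + 1 : Nat) : Int) from by push_cast; ring]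
      exact PySem.List.slice_to_natCast _ _
    have hfilt : L.filter (fun c =>
        PySem.Str.startswith c (PySem.Str.slice s none (some ((k : Int) + 1))))
        = pvF L (s.toList.take (k + 1)) := by
      unfold pvF
      apply List.filter_congr
      intro c _
      rw [PySem.Str.startswith_eq, hpref]
    simp only [hfilt]
    by_cases h : pvF L (s.toList.take (k + 1)) = [] <;> simp [h]
  calc (List.range s.toList.length).foldl _ []
      = (List.range s.toList.length).foldl (fun res k =>
          res ++ [(let m := pvF L (s.toList.take (k + 1)); if m = [] then ["0"] else m)]) [] := by
        apply PySem.List.foldl_congr_mem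
        intro res k _
        exact hstep res k
    _ = _ := by
        rw [PySem.List.foldl_append_singleton_eq_map]
        simp

-- ===== VERDICT (by name: the statement is the Claim_ definition above) =====
theorem displayContacts_spec : Claim_equal_displayContacts := by
  intro n contact s _
  simp only [Spec_displayContacts, displayContacts, displayContacts_alt]
  rw [displayContacts_eq_map]
  have h := dcGo_eq s.toList [] (PySem.List.sorted (PySem.Set.ofList contact) (fun x => x) false)
  rw [pvF_nil] at h
  simp only [List.length_nil, List.nil_append, Nat.zero_add] at h
  rw [h]
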